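-- pv_equiv track=rewrite | github.com/keybase/saltpack-python | armor.py | chunk_string_ignoring_whitespace
-- ===== SOURCE A (Python) =====
-- def chunk_string_ignoring_whitespace(s, size):
--     'Skip over whitespace when assembling chunks.'
--     assert size > 1
--     chunks = []
--     chunk = ''
--     for c in s:
--         if c.isspace():
--             continue
--         chunk += c
--         if len(chunk) == size:
--             chunks.append(chunk)
--             chunk = ''
--     if chunk:
--         chunks.append(chunk)
--     return chunks
-- ===== SOURCE B (Python) =====
-- def chunk_string_ignoring_whitespace(s, size):
--     'Skip over whitespace when assembling chunks.'
--     assert size > 1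
--     stripped = ''.join(c for c in s if not c.isspace())
--     return [stripped[i:i + size] for i in range(0, len(stripped), size)]
-- ===== Notes on version B (the rewrite author's own statement) =====
-- stated objective: simpler
-- what changed: Replaces the running-accumulator flush loop (append char by char, emit when full, flush remainder) by a two-phase computation: strip whitespace in one pass, then cut fixed-stride slices with range/slicing.
import Mathlib
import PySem

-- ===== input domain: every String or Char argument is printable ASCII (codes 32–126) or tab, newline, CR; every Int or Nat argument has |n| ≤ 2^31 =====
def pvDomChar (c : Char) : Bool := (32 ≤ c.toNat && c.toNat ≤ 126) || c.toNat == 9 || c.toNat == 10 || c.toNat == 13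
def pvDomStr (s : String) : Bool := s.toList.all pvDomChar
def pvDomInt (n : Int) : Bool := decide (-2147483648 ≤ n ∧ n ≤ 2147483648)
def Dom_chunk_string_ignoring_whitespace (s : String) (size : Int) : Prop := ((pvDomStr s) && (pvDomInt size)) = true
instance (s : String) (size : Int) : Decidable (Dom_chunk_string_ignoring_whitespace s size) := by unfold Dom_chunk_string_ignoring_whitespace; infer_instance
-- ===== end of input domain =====

-- B replaces A's running-accumulator flush loop by filter-then-slice (strip whitespace, then fixed-stride slices); objective: simpler.

-- ===== PORT A =====
-- A's for-loop over the characters with state (chunks, chunk); chunks are kept as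
-- List Char and turned into String only at the end (String.ofList), as PySem advises.
def csiwLoop (size : Int) : List Char → List (List Char) → List Char → List (List Char) × List Char
  | [], chunks, chunk => (chunks, chunk)
  | c :: cs, chunks, chunk =>
    if PySem.Chars.isspace c then
      csiwLoop size cs chunks chunk
    else
      let chunk' := chunk ++ [c]
      if (chunk'.length : Int) = size then csiwLoop size cs (chunks ++ [chunk']) []
      else csiwLoop size cs chunks chunk'

-- A's trailing `if chunk: chunks.append(chunk)`.
def csiwFlush (r : List (List Char) × List Char) : List (List Char) :=
  if r.2 ≠ [] then r.1 ++ [r.2] else r.1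

def chunk_string_ignoring_whitespace (s : String) (size : Int) : List String :=
  (csiwFlush (csiwLoop size s.toList [] [])).map String.ofList

-- ===== PORT B =====
-- B's `stripped = ''.join(c for c in s if not c.isspace())`.
def csiwStripped (s : String) : List Char :=
  s.toList.filter (fun c => !PySem.Chars.isspace c)

def chunk_string_ignoring_whitespace_alt (s : String) (size : Int) : List String :=
  (PySem.List.pyRange 0 ((csiwStripped s).length : Int) size).map
    (fun i => String.ofList (PySem.List.slice (csiwStripped s) (some i) (some (i + size))))

-- ===== PRECONDITION & SPEC =====
-- Pre_ excludes exactly size ≤ 1, where A's `assert size > 1` raises AssertionError.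
def Pre_chunk_string_ignoring_whitespace (s : String) (size : Int) : Prop := 1 < size
instance (s : String) (size : Int) : Decidable (Pre_chunk_string_ignoring_whitespace s size) := by unfold Pre_chunk_string_ignoring_whitespace; infer_instance

def pvWitness_chunk_string_ignoring_whitespace : String × Int := ("ab cde", 2)

def Spec_chunk_string_ignoring_whitespace (s : String) (size : Int) (out : List String) : Prop := out = chunk_string_ignoring_whitespace_alt s size
instance (s : String) (size : Int) (out : List String) : Decidable (Spec_chunk_string_ignoring_whitespace s size out) := by unfold Spec_chunk_string_ignoring_whitespace; infer_instance

-- ===== CLAIM (what is proved, stated in full; the proofs are below) =====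
def Claim_equal_chunk_string_ignoring_whitespace : Prop := ∀ (s : String) (size : Int), Dom_chunk_string_ignoring_whitespace s size → Pre_chunk_string_ignoring_whitespace s size → Spec_chunk_string_ignoring_whitespace s size (chunk_string_ignoring_whitespace s size)

-- ===== LEMMAS AND PROOFS =====

-- The common intermediate value: greedy chunking of a whitespace-free list.
def chunksOf (k : Nat) (l : List Char) : List (List Char) :=
  if l = [] ∨ k = 0 then [] else l.take k :: chunksOf k (l.drop k)
termination_by l.length
decreasing_by
  rename_i h
  push_neg at h
  have hl : l ≠ [] := h.1
  have hk : 0 < k := Nat.pos_of_ne_zero h.2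
  have : 0 < l.length := List.length_pos_iff.mpr hl
  simp [List.length_drop]
  omega

lemma csiwLoop_filter (size : Int) (t : List Char) :
    ∀ chunks chunk, csiwLoop size t chunks chunk
      = csiwLoop size (t.filter (fun c => !PySem.Chars.isspace c)) chunks chunk := by
  induction t with
  | nil => intro chunks chunk; rfl
  | cons c cs ih =>
    intro chunks chunk
    by_cases hc : PySem.Chars.isspace c
    · simp [csiwLoop, hc, ih]
    · simp only [List.filter_cons, hc, Bool.not_false]
      simp [csiwLoop, hc, ih]

lemma csiwLoop_run (k : Nat) (hk : 2 ≤ k) (t : List Char) :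
    ∀ chunks chunk, (∀ c ∈ t, PySem.Chars.isspace c = false) → chunk.length < k →
    csiwFlush (csiwLoop (k : Int) t chunks chunk) = chunks ++ chunksOf k (chunk ++ t) := by
  induction t with
  | nil =>
    intro chunks chunk _ hlen
    simp only [csiwLoop, List.append_nil, csiwFlush]
    by_cases hc : chunk = []
    · subst hc
      rw [chunksOf]
      simp
    · rw [chunksOf]
      have h1 : chunk.take k = chunk := List.take_of_length_le (le_of_lt hlen)
      have h2 : chunk.drop k = [] := List.drop_eq_nil_of_le (le_of_lt hlen)
      simp [hc, show ¬ (k = 0) from by omega, h1, h2, chunksOf]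
  | cons c cs ih =>
    intro chunks chunk hws hlen
    have hc : PySem.Chars.isspace c = false := hws c (by simp)
    simp only [csiwLoop, hc, Bool.false_eq_true, if_false]
    split
    case isTrue hfull =>
      have hfl : chunk.length + 1 = k := by
        have h := hfull
        simp at h
        omega
      rw [ih _ _ (fun x hx => hws x (by simp [hx])) (by simp only [List.length_nil]; omega)]
      have hsplit : chunksOf k (chunk ++ c :: cs) = (chunk ++ [c]) :: chunksOf k cs := by
        rw [chunksOf]
        have hne : ¬ (chunk ++ c :: cs = [] ∨ k = 0) := by
          push_neg
          exact ⟨by simp, by omega⟩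
        have hsp : chunk ++ c :: cs = (chunk ++ [c]) ++ cs := by simp
        have htake : (chunk ++ c :: cs).take k = chunk ++ [c] := by
          rw [hsp, List.take_append_of_le_length (by simp; omega),
              List.take_of_length_le (by simp; omega)]
        have hdrop : (chunk ++ c :: cs).drop k = cs := by
          rw [hsp, List.drop_append_of_le_length (by simp; omega),
              List.drop_eq_nil_of_le (by simp; omega)]
          simp
        rw [if_neg hne, htake, hdrop]
      rw [hsplit]
      simp
    case isFalse hfull =>
      have hfl : ¬ (chunk.length + 1 = k) := by
        intro h
        apply hfull
        push_cast
        simp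
        omega
      rw [ih _ _ (fun x hx => hws x (by simp [hx])) (by simp; omega)]
      congr 2
      simp

lemma pyRange_nil_of_le (a b s : Int) (hs : 0 < s) (hab : b ≤ a) :
    PySem.List.pyRange a b s = [] := by
  rw [PySem.List.pyRange_of_pos _ _ hs]
  simp [show ¬ (a < b) from by omega]

lemma pyRange_pos_cons (a b s : Int) (hs : 0 < s) (hab : a < b) :
    PySem.List.pyRange a b s = a :: PySem.List.pyRange (a + s) b s := by
  rw [PySem.List.pyRange_of_pos _ _ hs, PySem.List.pyRange_of_pos _ _ hs, if_pos hab]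
  have hrw : b - a + s - 1 = (b - a - 1) + 1 * s := by ring
  rw [hrw, Int.add_mul_ediv_right _ _ (ne_of_gt hs)]
  have hd0 : 0 ≤ (b - a - 1) / s := Int.ediv_nonneg (by omega) (le_of_lt hs)
  by_cases h2 : a + s < b
  · rw [if_pos h2]
    have harg : b - (a + s) + s - 1 = b - a - 1 := by ring
    rw [harg]
    have hcnt : ((b - a - 1) / s + 1).toNat = ((b - a - 1) / s).toNat + 1 := by omega
    rw [hcnt, List.range_succ_eq_map, List.map_cons, List.map_map]
    refine List.cons_eq_cons.mpr ⟨by simp, ?_⟩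
    apply List.map_congr_left
    intro j _
    simp [Function.comp]
    ring
  · rw [if_neg h2]
    have hdz : (b - a - 1) / s = 0 := Int.ediv_eq_zero_of_lt (by omega) (by omega)
    rw [hdz]
    norm_num [List.range_one]

lemma pyRange_pos_shift (b s : Int) (hs : 0 < s) :
    PySem.List.pyRange s b s = (PySem.List.pyRange 0 (b - s) s).map (· + s) := by
  rw [PySem.List.pyRange_of_pos _ _ hs, PySem.List.pyRange_of_pos _ _ hs, List.map_map]
  have hcond : (s < b) ↔ (0 < b - s) := by omega
  have harg : b - s + s - 1 = b - s - 0 + s - 1 := by ring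
  simp only [hcond, harg]
  apply List.map_congr_left
  intro j _
  simp [Function.comp]
  ring

lemma slice_shift (l : List Char) (k : Nat) (i : Int) (hi : 0 ≤ i) :
    PySem.List.slice l (some (i + (k : Int))) (some (i + (k : Int) + (k : Int)))
      = PySem.List.slice (l.drop k) (some i) (some (i + (k : Int))) := by
  rw [PySem.List.slice_toNat _ (by omega) (by omega),
      PySem.List.slice_toNat _ (by omega) (by omega), List.drop_drop]
  have h1 : (i + (k : Int) + (k : Int)).toNat - (i + (k : Int)).toNat
      = (i + (k : Int)).toNat - i.toNat := by omega
  have h2 : (i + (k : Int)).toNat = i.toNat + k := by omega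
  rw [h1, h2]
  first | rfl | rw [Nat.add_comm]

lemma mapSlice_eq_chunksOf (k : Nat) (hk : 0 < k) (l : List Char) :
    (PySem.List.pyRange 0 (l.length : Int) (k : Int)).map
        (fun i => PySem.List.slice l (some i) (some (i + (k : Int))))
      = chunksOf k l := by
  induction l using chunksOf.induct k with
  | case1 l h =>
    rcases h with h | h
    · subst h
      rw [chunksOf]
      simp [pyRange_nil_of_le 0 0 (k : Int) (by exact_mod_cast hk) (le_refl 0)]
    · omega
  | case2 l h ih =>
    push_neg at h
    obtain ⟨hl, -⟩ := h
    have hn : 0 < l.length := List.length_pos_iff.mpr hl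
    have hks : (0 : Int) < (k : Int) := by exact_mod_cast hk
    rw [pyRange_pos_cons 0 (l.length : Int) (k : Int) hks (by exact_mod_cast hn)]
    simp only [List.map_cons, zero_add]
    rw [chunksOf, if_neg (by push_neg; exact ⟨hl, by omega⟩)]
    refine List.cons_eq_cons.mpr ⟨?_, ?_⟩
    · rw [PySem.List.slice_toNat _ (by omega) (by omega)]
      simp
    · rw [pyRange_pos_shift (l.length : Int) (k : Int) hks, List.map_map]
      have htail : ((PySem.List.pyRange 0 ((l.length : Int) - (k : Int)) (k : Int)).map
            ((fun i => PySem.List.slice l (some i) (some (i + (k : Int)))) ∘ (· + (k : Int))))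
          = (PySem.List.pyRange 0 ((l.length : Int) - (k : Int)) (k : Int)).map
            (fun i => PySem.List.slice (l.drop k) (some i) (some (i + (k : Int)))) := by
        apply List.map_congr_left
        intro i hi
        have h0i : 0 ≤ i := ((PySem.List.mem_pyRange_iff_of_pos hks i).mp hi).1
        simp only [Function.comp]
        exact slice_shift l k i h0i
      rw [htail]
      by_cases hkn : k ≤ l.length
      · have hcast : ((l.drop k).length : Int) = (l.length : Int) - (k : Int) := by
          simp [List.length_drop]
          omega
        rw [← hcast]
        exact ih
      · have h1 : PySem.List.pyRange 0 ((l.length : Int) - (k : Int)) (k : Int) = [] :=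
          pyRange_nil_of_le _ _ _ hks (by omega)
        have h2 : l.drop k = [] := List.drop_eq_nil_of_le (by omega)
        rw [h1, h2, chunksOf]
        simp

-- ===== VERDICT (by name: the statement is the Claim_ definition above) =====
theorem chunk_string_ignoring_whitespace_spec : Claim_equal_chunk_string_ignoring_whitespace := by
  intro s size _ hpre
  unfold Pre_chunk_string_ignoring_whitespace at hpre
  unfold Spec_chunk_string_ignoring_whitespace
  unfold chunk_string_ignoring_whitespace chunk_string_ignoring_whitespace_alt
  have hsz : size = (size.toNat : Int) := by omega
  have hk2 : 2 ≤ size.toNat := by omega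
  have hws : ∀ c ∈ csiwStripped s, PySem.Chars.isspace c = false := by
    intro c hc
    have := List.of_mem_filter hc
    simpa using this
  rw [hsz, csiwLoop_filter, show s.toList.filter (fun c => !PySem.Chars.isspace c) = csiwStripped s from rfl]
  rw [csiwLoop_run size.toNat hk2 (csiwStripped s) [] [] hws (by simp; omega)]
  simp only [List.nil_append]
  rw [← mapSlice_eq_chunksOf size.toNat (by omega) (csiwStripped s)]
  simp [List.map_map, Function.comp]
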